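-- pv_equiv track=rewrite | github.com/07734willy/small_programs | operator_permutations/op.py | expr_perm
-- ===== SOURCE A (Python) =====
-- def expr_perm(values, operations="+-*/", stack=[]):
--     solution = []
--     if len(stack) > 1:
--         for op in operations:
--             new_stack = list(stack)
--             new_stack.append("(" + new_stack.pop() + op + new_stack.pop() + ")")
--             solution += expr_perm(values, operations, new_stack)
--     if values:
--         for i, val in enumerate(values):
--             new_values = values[:i] + values[i+1:]
--             solution += expr_perm(new_values, operations, stack + [str(val)])
--     elif len(stack) == 1:
--         return stack
--     return solution
-- ===== SOURCE B (Python) =====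
-- def expr_perm(values, operations="+-*/", stack=[]):
--     # Iterative DFS over an explicit work-stack instead of A's recursion.
--     results = []
--     work = [(list(values), list(stack))]
--     while work:
--         vals, st = work.pop()
--         if not vals and len(st) == 1:
--             results.append(st[0])
--             continue
--         children = []
--         if len(st) > 1:
--             for op in operations:
--                 children.append((vals, st[:-2] + ["(" + st[-1] + op + st[-2] + ")"]))
--         for i in range(len(vals)):
--             children.append((vals[:i] + vals[i + 1:], st + [str(vals[i])]))
--         work.extend(reversed(children))
--     return results
-- ===== Notes on version B (the rewrite author's own statement) =====
-- stated objective: alternative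
-- what changed: Replaces A's recursive enumeration (which concatenates the result lists of recursive calls at every level) by an iterative depth-first search over an explicit work-stack of (values, expr-stack) states that appends each finished expression directly to one result list.
import Mathlib
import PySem

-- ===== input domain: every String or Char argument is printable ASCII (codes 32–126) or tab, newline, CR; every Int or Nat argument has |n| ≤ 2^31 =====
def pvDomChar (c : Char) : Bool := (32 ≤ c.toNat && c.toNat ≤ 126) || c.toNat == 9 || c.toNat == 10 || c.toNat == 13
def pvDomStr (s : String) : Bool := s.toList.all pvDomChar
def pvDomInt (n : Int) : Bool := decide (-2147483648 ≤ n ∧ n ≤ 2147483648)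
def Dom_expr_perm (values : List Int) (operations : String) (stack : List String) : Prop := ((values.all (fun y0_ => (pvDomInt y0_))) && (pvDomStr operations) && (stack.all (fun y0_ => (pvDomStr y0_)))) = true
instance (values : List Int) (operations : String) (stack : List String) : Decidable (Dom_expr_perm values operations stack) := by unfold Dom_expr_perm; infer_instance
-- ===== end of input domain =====

-- B replaces A's recursion by an iterative DFS over an explicit work-stack (alternative decomposition, same cost).

-- ===== PORT A =====
-- A's `new_stack = list(stack); new_stack.append("(" + new_stack.pop() + op + new_stack.pop() + ")")`:
-- pop the last two elements and append the combined expression.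
def popCombine (st : List String) (op : Char) : List String :=
  match st.reverse with
  | b :: a :: rest => (("(" ++ b ++ String.singleton op ++ a ++ ")") :: rest).reverse
  | _ => st

-- termination lemma for port A's recursion
theorem popCombine_length (st : List String) (op : Char) (h : 1 < st.length) :
    (popCombine st op).length = st.length - 1 := by
  have h2 : 2 ≤ st.reverse.length := by simpa using h
  rcases hr : st.reverse with _ | ⟨b, _ | ⟨a, rest⟩⟩
  · rw [hr] at h2; simp at h2
  · rw [hr] at h2; simp at h2
  · have hlen : st.length = rest.length + 2 := by
      have hl := congrArg List.length hr; simp at hl; omega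
    unfold popCombine
    rw [hr]
    simp
    omega

-- transliteration of A; each Python `solution += expr_perm(...)` loop is the corresponding
-- flatMap fold over the same items in the same order
def expr_perm (values : List Int) (operations : String) (stack : List String) : List String :=
  let sol1 := if h : 1 < stack.length then
      operations.toList.flatMap (fun op => expr_perm values operations (popCombine stack op))
    else []
  if values ≠ [] then
    -- `.attach` only carries the `i < length` fact for termination; it does not change the list
    sol1 ++ (List.range values.length).attach.flatMap
      (fun i => expr_perm (values.take i.1 ++ values.drop (i.1 + 1)) operations
        (stack ++ [PySem.Int.toStr (values.getD i.1 0)]))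
  else if stack.length = 1 then stack
  else sol1
termination_by 2 * values.length + stack.length
decreasing_by
  · have := popCombine_length stack op h
    omega
  · have hi := i.2
    simp at hi
    simp
    omega

-- ===== PORT B =====
-- B's `st[:-2] + ["(" + st[-1] + op + st[-2] + ")"]`
def combineB (st : List String) (op : Char) : List String :=
  st.take (st.length - 2) ++
    ["(" ++ st.getD (st.length - 1) "" ++ String.singleton op ++ st.getD (st.length - 2) "" ++ ")"]

-- the `children` list B builds for one popped state, in order
def childrenB (vals : List Int) (operations : String) (st : List String) :
    List (List Int × List String) :=
  (if 1 < st.length then operations.toList.map (fun op => (vals, combineB st op)) else []) ++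
    (List.range vals.length).map
      (fun i => (vals.take i ++ vals.drop (i + 1), st ++ [PySem.Int.toStr (vals.getD i 0)]))

-- termination lemma for nodeCount / bLoop
theorem childrenB_measure (vals : List Int) (operations : String) (st : List String) :
    ∀ p ∈ childrenB vals operations st, 2 * p.1.length + p.2.length < 2 * vals.length + st.length := by
  intro p hp
  rcases List.mem_append.mp hp with hc | hv
  · by_cases h1 : 1 < st.length
    · simp [h1] at hc
      obtain ⟨op, _, rfl⟩ := hc
      simp [combineB]
      omega
    · simp [h1] at hc
  · simp at hv
    obtain ⟨i, hi, rfl⟩ := hv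
    simp
    omega

-- iteration-count helper used only as bLoop's termination measure
def nodeCount (vals : List Int) (operations : String) (st : List String) : Nat :=
  1 + ((childrenB vals operations st).attach.map (fun p => nodeCount p.1.1 operations p.1.2)).sum
termination_by 2 * vals.length + st.length
decreasing_by exact childrenB_measure vals operations st _ p.2

-- B's `while work:` loop with its result accumulator
def bLoop (operations : String) (work : List (List Int × List String)) (results : List String) :
    List String :=
  match work with
  | [] => results
  | (vals, st) :: rest =>
    if vals = [] ∧ st.length = 1 then
      bLoop operations rest (results ++ [st.headI])
    else
      -- pushing `reversed(children)` onto the stack = prepending `children` in order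
      bLoop operations (childrenB vals operations st ++ rest) results
termination_by (work.map (fun p => nodeCount p.1 operations p.2)).sum
decreasing_by
  · have h1 : 0 < nodeCount vals operations st := by rw [nodeCount]; omega
    simp
    omega
  · have h2 : nodeCount vals operations st =
        1 + ((childrenB vals operations st).map (fun p => nodeCount p.1 operations p.2)).sum := by
      rw [nodeCount,
        show (fun (p : {x // x ∈ childrenB vals operations st}) => nodeCount p.1.1 operations p.1.2) =
          (fun q : List Int × List String => nodeCount q.1 operations q.2) ∘ Subtype.val from rfl,
        ← List.map_map, List.attach_map_subtype_val]
    simp [List.map_append]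
    omega

def expr_perm_alt (values : List Int) (operations : String) (stack : List String) : List String :=
  bLoop operations [(values, stack)] []

-- ===== PRECONDITION & SPEC =====
def Spec_expr_perm (values : List Int) (operations : String) (stack : List String) (out : List String) : Prop := out = expr_perm_alt values operations stack
instance (values : List Int) (operations : String) (stack : List String) (out : List String) : Decidable (Spec_expr_perm values operations stack out) := by unfold Spec_expr_perm; infer_instance

-- ===== CLAIM (what is proved, stated in full; the proofs are below) =====
def Claim_equal_expr_perm : Prop := ∀ (values : List Int) (operations : String) (stack : List String), Dom_expr_perm values operations stack → Spec_expr_perm values operations stack (expr_perm values operations stack)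

-- ===== LEMMAS AND PROOFS =====


theorem combineB_append (R : List String) (a b : String) (op : Char) :
    combineB (R ++ [a, b]) op = R ++ ["(" ++ b ++ String.singleton op ++ a ++ ")"] := by
  simp [combineB, List.getD]

theorem popCombine_append (R : List String) (a b : String) (op : Char) :
    popCombine (R ++ [a, b]) op = R ++ ["(" ++ b ++ String.singleton op ++ a ++ ")"] := by
  unfold popCombine
  have hr : (R ++ [a, b]).reverse = b :: a :: R.reverse := by simp
  rw [hr]
  simp

theorem combineB_eq_popCombine (st : List String) (op : Char) (h : 1 < st.length) :
    combineB st op = popCombine st op := by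
  have h2 : 2 ≤ st.reverse.length := by simpa using h
  rcases hr : st.reverse with _ | ⟨b, _ | ⟨a, rest⟩⟩
  · rw [hr] at h2; simp at h2
  · rw [hr] at h2; simp at h2
  · have hst : st = rest.reverse ++ [a, b] := by
      have hrev := congrArg List.reverse hr
      simpa using hrev
    rw [hst, combineB_append, popCombine_append]

-- A computes, at each node, exactly the concatenation of its own results over B's `children`
theorem exprA_char (values : List Int) (operations : String) (stack : List String) :
    expr_perm values operations stack =
      if values = [] ∧ stack.length = 1 then stack
      else (childrenB values operations stack).flatMap (fun p => expr_perm p.1 operations p.2) := by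
  rw [expr_perm, childrenB]
  have hcomb :
      (if 1 < stack.length then
          operations.toList.map (fun op => (values, combineB stack op))
        else []).flatMap (fun p => expr_perm p.1 operations p.2) =
      (if h : 1 < stack.length then
          operations.toList.flatMap (fun op => expr_perm values operations (popCombine stack op))
        else []) := by
    by_cases hgt : 1 < stack.length
    · simp only [hgt, if_true, dif_pos, List.flatMap_map]
      exact List.flatMap_congr (fun op _ => by rw [combineB_eq_popCombine stack op hgt])
    · simp [hgt]
  have hattach : (List.range values.length).attach.flatMap
      (fun i => expr_perm (values.take i.1 ++ values.drop (i.1 + 1)) operations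
        (stack ++ [PySem.Int.toStr (values.getD i.1 0)])) =
    (List.range values.length).flatMap
      (fun a => expr_perm (values.take a ++ values.drop (a + 1)) operations
        (stack ++ [PySem.Int.toStr (values.getD a 0)])) := by
    rw [List.flatMap_def,
      show (fun (i : {x // x ∈ List.range values.length}) =>
          expr_perm (values.take i.1 ++ values.drop (i.1 + 1)) operations
            (stack ++ [PySem.Int.toStr (values.getD i.1 0)])) =
        (fun a => expr_perm (values.take a ++ values.drop (a + 1)) operations
            (stack ++ [PySem.Int.toStr (values.getD a 0)])) ∘ Subtype.val from rfl,
      ← List.map_map, List.attach_map_subtype_val, ← List.flatMap_def]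
  rw [List.flatMap_append, hcomb, List.flatMap_map, hattach]
  by_cases hv : values = []
  · subst hv
    by_cases h1 : stack.length = 1
    · simp [h1]
    · simp [h1]
  · have hterm : ¬ (values = [] ∧ stack.length = 1) := fun hh => hv hh.1
    simp [hv]

theorem bLoop_eq (operations : String) :
    ∀ (work : List (List Int × List String)) (results : List String),
      bLoop operations work results =
        results ++ work.flatMap (fun p => expr_perm p.1 operations p.2) := by
  intro work results
  fun_induction bLoop operations work results with
  | case1 results => simp
  | case2 results vals st rest hterm ih =>
    obtain ⟨hv, hs⟩ := hterm
    subst hv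
    rw [ih]
    have hst : st = [st.headI] := by
      rcases st with _ | ⟨x, _ | _⟩ <;> simp_all
    simp only [List.flatMap_cons]
    rw [exprA_char]
    simp [hs]
    conv_rhs => rw [hst]
    simp
  | case3 results vals st rest hterm ih =>
    rw [ih]
    simp only [List.flatMap_cons]
    rw [exprA_char]
    simp [hterm, List.flatMap_append]

-- ===== VERDICT (by name: the statement is the Claim_ definition above) =====
theorem expr_perm_spec : Claim_equal_expr_perm := by
  intro values operations stack _
  unfold Spec_expr_perm expr_perm_alt
  rw [bLoop_eq]
  simp
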